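-- pv_equiv track=rewrite | github.com/UNO-Babb/homework-3-adomitron | dark_candy_land/app.py | next_color_index
-- ===== SOURCE A (Python) =====
-- def next_color_index(board, start_idx, color, steps=1):
--     idx = start_idx
--     found = 0
--     while idx < len(board) - 1:
--         idx += 1
--         if board[idx]["color"] == color:
--             found += 1
--             if found == steps:
--                 return idx
--     return start_idx
-- ===== SOURCE B (Python) =====
-- def _next_match(board, idx, color):
--     """First index i with idx < i <= len(board)-1 and board[i]['color'] == color, else None."""
--     i = idx + 1
--     while i <= len(board) - 1:
--         if board[i]["color"] == color:
--             return i
--         i += 1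
--     return None
--
-- def next_color_index(board, start_idx, color, steps=1):
--     # Iterate the "next matching cell" successor function `steps` times.
--     j = start_idx
--     for _ in range(steps):
--         nxt = _next_match(board, j, color)
--         if nxt is None:
--             return start_idx
--         j = nxt
--     return j
-- ===== Notes on version B (the rewrite author's own statement) =====
-- stated objective: alternative
-- what changed: B decomposes the task as a steps-fold iteration of a 'find next cell of this color' successor helper (returning start_idx if the chain runs out), instead of A's single fused while-scan that carries a match counter and early-returns on the steps-th match.
import Mathlib
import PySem

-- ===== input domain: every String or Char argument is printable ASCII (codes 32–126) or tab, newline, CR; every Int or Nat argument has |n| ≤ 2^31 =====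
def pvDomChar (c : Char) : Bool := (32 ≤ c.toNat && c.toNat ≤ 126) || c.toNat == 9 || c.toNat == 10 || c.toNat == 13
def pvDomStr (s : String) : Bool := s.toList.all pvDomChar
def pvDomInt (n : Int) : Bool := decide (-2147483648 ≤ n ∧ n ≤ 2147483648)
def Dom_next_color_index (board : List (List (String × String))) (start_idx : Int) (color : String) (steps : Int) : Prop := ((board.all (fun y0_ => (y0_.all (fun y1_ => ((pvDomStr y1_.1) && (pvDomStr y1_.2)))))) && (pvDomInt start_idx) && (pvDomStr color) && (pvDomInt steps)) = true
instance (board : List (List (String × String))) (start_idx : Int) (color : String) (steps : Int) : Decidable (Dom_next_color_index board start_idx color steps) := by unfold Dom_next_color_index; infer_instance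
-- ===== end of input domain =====

-- B re-decomposes A's fused counting scan as steps-fold iteration of a find-next-match helper (alternative, same cost); equal on all inputs where A returns (Pre_ excludes exactly A's IndexError/KeyError inputs).


-- ===== PORT A =====
-- A's while-loop: advance idx, count matches, early-return on the steps-th match.
def nciLoop (board : List (List (String × String))) (color : String) (steps start_idx idx found : Int) : Int :=
  if _h : idx < (board.length : Int) - 1 then
    match PySem.List.pyGet? board (idx + 1) with
    | none => start_idx   -- Python raises IndexError here; excluded by Pre_
    | some cell =>
      match List.lookup "color" cell with
      | none => start_idx -- Python raises KeyError here; excluded by Pre_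
      | some c =>
        if c == color then
          if found + 1 == steps then idx + 1
          else nciLoop board color steps start_idx (idx + 1) (found + 1)
        else nciLoop board color steps start_idx (idx + 1) found
  else start_idx
termination_by ((board.length : Int) - 1 - idx).toNat
decreasing_by all_goals omega

def next_color_index (board : List (List (String × String))) (start_idx : Int) (color : String) (steps : Int) : Int :=
  nciLoop board color steps start_idx start_idx 0

-- ===== PORT B =====
-- B's _next_match helper: first i with idx < i ≤ len-1 and board[i]["color"] == color, else none.
def nmLoop (board : List (List (String × String))) (color : String) (i : Int) : Option Int :=
  if _h : i ≤ (board.length : Int) - 1 then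
    match PySem.List.pyGet? board i with
    | none => none      -- Python raises IndexError here; excluded by Pre_
    | some cell =>
      match List.lookup "color" cell with
      | none => none    -- Python raises KeyError here; excluded by Pre_
      | some c => if c == color then some i else nmLoop board color (i + 1)
  else none
termination_by ((board.length : Int) - i).toNat
decreasing_by omega

-- B's 'for _ in range(steps)' loop iterating the successor; fuel = remaining iterations.
def nciAltGo (board : List (List (String × String))) (color : String) (start_idx : Int) : Nat → Int → Int
  | 0, j => j
  | n + 1, j =>
    match nmLoop board color (j + 1) with
    | none => start_idx
    | some nxt => nciAltGo board color start_idx n nxt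

def next_color_index_alt (board : List (List (String × String))) (start_idx : Int) (color : String) (steps : Int) : Int :=
  nciAltGo board color start_idx steps.toNat start_idx

-- ===== PRECONDITION & SPEC =====
-- Pre_ excludes exactly the inputs on which Python A raises: IndexError (scan runs and start_idx+1 < -len(board))
-- and KeyError (the scan reaches a cell without a "color" key before returning, i.e. some keyless scanned cell has
-- fewer than steps matches before it, or steps < 1 while a keyless cell is in scan range); A returns on all other inputs.
def Pre_next_color_index (board : List (List (String × String))) (start_idx : Int) (color : String) (steps : Int) : Prop :=
  start_idx < (board.length : Int) - 1 →
    (-(board.length : Int) ≤ start_idx + 1 ∧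
     ∀ i ∈ PySem.List.pyRange (start_idx + 1) (board.length : Int) 1,
       ((PySem.List.pyGet? board i).bind (fun cell => List.lookup "color" cell)) = none →
         1 ≤ steps ∧ steps ≤ (((PySem.List.pyRange (start_idx + 1) i 1).countP
           (fun j => ((PySem.List.pyGet? board j).bind (fun cell => List.lookup "color" cell)) == some color) : Nat) : Int))
instance (board : List (List (String × String))) (start_idx : Int) (color : String) (steps : Int) : Decidable (Pre_next_color_index board start_idx color steps) := by unfold Pre_next_color_index; infer_instance

def pvWitness_next_color_index : (List (List (String × String))) × Int × String × Int :=
  ([[("color", "r")], [("color", "g")]], 0, "g", 1)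

def Spec_next_color_index (board : List (List (String × String))) (start_idx : Int) (color : String) (steps : Int) (out : Int) : Prop := out = next_color_index_alt board start_idx color steps
instance (board : List (List (String × String))) (start_idx : Int) (color : String) (steps : Int) (out : Int) : Decidable (Spec_next_color_index board start_idx color steps out) := by unfold Spec_next_color_index; infer_instance

-- ===== CLAIM =====
def Claim_equal_next_color_index : Prop := ∀ (board : List (List (String × String))) (start_idx : Int) (color : String) (steps : Int), Dom_next_color_index board start_idx color steps → Pre_next_color_index board start_idx color steps → Spec_next_color_index board start_idx color steps (next_color_index board start_idx color steps)

-- ===== LEMMAS AND PROOFS =====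

-- abbreviation used only in proofs: color lookup at raw index j
def nciLook (board : List (List (String × String))) (j : Int) : Option String :=
  (PySem.List.pyGet? board j).bind (fun cell => List.lookup "color" cell)

lemma nciLook_some (board : List (List (String × String))) (j : Int)
    (h3 : nciLook board j ≠ none) : ∃ c, nciLook board j = some c := by
  cases h : nciLook board j with
  | none => exact absurd h h3
  | some c => exact ⟨c, rfl⟩

-- steps ≤ 0: A scans to the end (no keyless cell in range by Pre_) and returns start_idx.
lemma nciLoop_nonpos (board : List (List (String × String))) (color : String)
    (steps start_idx : Int) (hsteps : steps ≤ 0) :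
    ∀ (n : Nat) (idx found : Int), ((board.length : Int) - 1 - idx).toNat = n →
      -(board.length : Int) ≤ idx + 1 → 0 ≤ found →
      (∀ i ∈ PySem.List.pyRange (idx + 1) (board.length : Int) 1, nciLook board i ≠ none) →
      nciLoop board color steps start_idx idx found = start_idx := by
  intro n
  induction n with
  | zero =>
    intro idx found hn _ _ _
    rw [nciLoop, dif_neg (by omega)]
  | succ m ih =>
    intro idx found hn hlo hf hgood
    have hlt : idx < (board.length : Int) - 1 := by omega
    have hmem : idx + 1 ∈ PySem.List.pyRange (idx + 1) (board.length : Int) 1 := by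
      rw [PySem.List.mem_pyRange_one]; omega
    obtain ⟨c, hc⟩ := nciLook_some board (idx + 1) (hgood _ hmem)
    obtain ⟨cell, hcell, hlook⟩ : ∃ cell, PySem.List.pyGet? board (idx + 1) = some cell ∧
        List.lookup "color" cell = some c := by
      unfold nciLook at hc
      cases hg : PySem.List.pyGet? board (idx + 1) with
      | none => rw [hg] at hc; simp at hc
      | some cell => rw [hg] at hc; exact ⟨cell, rfl, by simpa using hc⟩
    have hgood' : ∀ i ∈ PySem.List.pyRange (idx + 1 + 1) (board.length : Int) 1, nciLook board i ≠ none := by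
      intro i hi
      refine hgood i ?_
      rw [PySem.List.mem_pyRange_one] at hi ⊢; omega
    rw [nciLoop, dif_pos hlt, hcell]; dsimp only; rw [hlook]; dsimp only
    by_cases hcc : (c == color) = true
    · rw [if_pos hcc, if_neg (by simp; omega)]
      exact ih (idx + 1) (found + 1) (by omega) (by omega) (by omega) hgood'
    · rw [if_neg hcc]
      exact ih (idx + 1) found (by omega) (by omega) hf hgood'

-- match count in the scanned range [a, i)
def nciCnt (board : List (List (String × String))) (color : String) (a i : Int) : Int :=
  (((PySem.List.pyRange a i 1).countP (fun j => nciLook board j == some color) : Nat) : Int)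

lemma nciCnt_cons (board : List (List (String × String))) (color : String) (a i : Int) (h : a < i) :
    nciCnt board color a i =
      (if nciLook board a == some color then 1 else 0) + nciCnt board color (a + 1) i := by
  unfold nciCnt
  rw [PySem.List.pyRange_one_cons h, List.countP_cons]
  split_ifs with hm
  · simp; omega
  · simp

-- MAIN: with found matches already counted and the steps-th still ahead (Pre_-style hypothesis H),
-- A's counting scan from idx equals B's (steps-found)-fold successor iteration from idx.
lemma nciLoop_eq_altGo (board : List (List (String × String))) (color : String)
    (steps start_idx : Int) :
    ∀ (n : Nat) (idx found : Int), ((board.length : Int) - 1 - idx).toNat = n →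
      -(board.length : Int) ≤ idx + 1 → 0 ≤ found → found < steps →
      (∀ i ∈ PySem.List.pyRange (idx + 1) (board.length : Int) 1, nciLook board i = none →
        steps ≤ found + nciCnt board color (idx + 1) i) →
      nciLoop board color steps start_idx idx found =
        nciAltGo board color start_idx (steps - found).toNat idx := by
  intro n
  induction n with
  | zero =>
    intro idx found hn _ _ hfs _
    obtain ⟨m, hm⟩ : ∃ m, (steps - found).toNat = m + 1 := ⟨(steps - found).toNat - 1, by omega⟩
    rw [nciLoop, dif_neg (by omega), hm, nciAltGo, nmLoop, dif_neg (by omega)]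
  | succ k ih =>
    intro idx found hn hlo hf hfs H
    have hlt : idx < (board.length : Int) - 1 := by omega
    have hmem : idx + 1 ∈ PySem.List.pyRange (idx + 1) (board.length : Int) 1 := by
      rw [PySem.List.mem_pyRange_one]; omega
    -- the cell at idx+1 has a key: otherwise H forces steps ≤ found
    have hkey : nciLook board (idx + 1) ≠ none := by
      intro hnone
      have := H _ hmem hnone
      unfold nciCnt at this
      rw [PySem.List.pyRange_one_eq_nil (by omega)] at this
      simp at this; omega
    obtain ⟨c, hc⟩ := nciLook_some board (idx + 1) hkey
    obtain ⟨cell, hcell, hlook⟩ : ∃ cell, PySem.List.pyGet? board (idx + 1) = some cell ∧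
        List.lookup "color" cell = some c := by
      unfold nciLook at hc
      cases hg : PySem.List.pyGet? board (idx + 1) with
      | none => rw [hg] at hc; simp at hc
      | some cell => rw [hg] at hc; exact ⟨cell, rfl, by simpa using hc⟩
    obtain ⟨m, hm⟩ : ∃ m, (steps - found).toNat = m + 1 := ⟨(steps - found).toNat - 1, by omega⟩
    rw [nciLoop, dif_pos hlt, hcell]; dsimp only; rw [hlook]; dsimp only
    by_cases hcc : (c == color) = true
    · -- matching cell at idx+1
      have hlookm : (nciLook board (idx + 1) == some color) = true := by
        rw [hc]; simpa using hcc
      have hnm : nmLoop board color (idx + 1) = some (idx + 1) := by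
        rw [nmLoop, dif_pos (by omega), hcell]; dsimp only; rw [hlook]; dsimp only; rw [if_pos hcc]
      rw [if_pos hcc]
      by_cases hdone : found + 1 = steps
      · rw [if_pos (by simpa using hdone)]
        have hm1 : (steps - found).toNat = 1 := by omega
        rw [hm1]
        simp [nciAltGo, hnm]
      · rw [if_neg (by simpa using hdone)]
        have H' : ∀ i ∈ PySem.List.pyRange (idx + 1 + 1) (board.length : Int) 1,
            nciLook board i = none → steps ≤ (found + 1) + nciCnt board color (idx + 1 + 1) i := by
          intro i hi hnone
          rw [PySem.List.mem_pyRange_one] at hi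
          have := H i (by rw [PySem.List.mem_pyRange_one]; omega) hnone
          rw [nciCnt_cons board color (idx + 1) i (by omega), if_pos hlookm] at this
          omega
        rw [ih (idx + 1) (found + 1) (by omega) (by omega) (by omega) (by omega) H']
        have : (steps - found).toNat = (steps - (found + 1)).toNat + 1 := by omega
        rw [this, nciAltGo, hnm]
    · -- non-matching cell at idx+1
      have hlookm : (nciLook board (idx + 1) == some color) = false := by
        rw [hc]; simpa using hcc
      have hnm : nmLoop board color (idx + 1) = nmLoop board color (idx + 1 + 1) := by
        rw [nmLoop, dif_pos (by omega), hcell]; dsimp only; rw [hlook]; dsimp only; rw [if_neg hcc]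
      have H' : ∀ i ∈ PySem.List.pyRange (idx + 1 + 1) (board.length : Int) 1,
          nciLook board i = none → steps ≤ found + nciCnt board color (idx + 1 + 1) i := by
        intro i hi hnone
        rw [PySem.List.mem_pyRange_one] at hi
        have := H i (by rw [PySem.List.mem_pyRange_one]; omega) hnone
        rw [nciCnt_cons board color (idx + 1) i (by omega), hlookm] at this
        simp at this
        omega
      rw [if_neg hcc, ih (idx + 1) found (by omega) (by omega) hf hfs H']
      -- unfold one level on both sides; both reduce to a match on nmLoop (idx+2)
      rw [hm, nciAltGo, nciAltGo, hnm]

-- ===== VERDICT =====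
theorem next_color_index_spec : Claim_equal_next_color_index := by
  intro board start_idx color steps _hdom hpre
  unfold Spec_next_color_index next_color_index next_color_index_alt
  by_cases hscan : start_idx < (board.length : Int) - 1
  · obtain ⟨hlo, H⟩ := hpre hscan
    by_cases hsteps : steps ≤ 0
    · -- A scans to the end and returns start_idx; B's range(steps) loop is empty.
      have hgood : ∀ i ∈ PySem.List.pyRange (start_idx + 1) (board.length : Int) 1,
          nciLook board i ≠ none := by
        intro i hi hnone
        have := (H i hi hnone).1
        omega
      rw [nciLoop_nonpos board color steps start_idx hsteps _ start_idx 0 rfl hlo le_rfl hgood]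
      have : steps.toNat = 0 := by omega
      rw [this, nciAltGo]
    · have H' : ∀ i ∈ PySem.List.pyRange (start_idx + 1) (board.length : Int) 1,
          nciLook board i = none → steps ≤ 0 + nciCnt board color (start_idx + 1) i := by
        intro i hi hnone
        have := (H i hi hnone).2
        unfold nciCnt nciLook
        omega
      have := nciLoop_eq_altGo board color steps start_idx
        ((board.length : Int) - 1 - start_idx).toNat start_idx 0 rfl hlo le_rfl (by omega) H'
      rw [this]
      have : (steps - 0).toNat = steps.toNat := by omega
      rw [this]
  · -- no scan: A returns start_idx; B's first _next_match finds nothing (or the loop is empty).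
    rw [nciLoop, dif_neg hscan]
    cases hs : steps.toNat with
    | zero => rw [nciAltGo]
    | succ m =>
      rw [nciAltGo, nmLoop, dif_neg (by omega)]
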